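-- pv_equiv track=rewrite | github.com/peirin1230-ship-it/R8.kaitei | scripts/原文/merge_shinkyuu.py | _ref_to_col
-- ===== SOURCE A (Python) =====
-- def _ref_to_col(ref):
--     """Excelのセル参照 (e.g., "A1", "AB3") から0始まりの列インデックスを返す"""
--     col = 0
--     for ch in ref:
--         if ch.isalpha():
--             col = col * 26 + (ord(ch.upper()) - ord('A') + 1)
--         else:
--             break
--     return col - 1
-- ===== SOURCE B (Python) =====
-- def _ref_to_col(ref):
--     """Excel cell ref -> 0-based column index: extract the alphabetic prefix,
--     then accumulate a positional sum over its reversed digits."""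
--     n = 0
--     while n < len(ref) and ref[n].isalpha():
--         n += 1
--     total = 0
--     place = 1
--     for c in reversed(ref[:n]):
--         total += (ord(c.upper()) - ord('A') + 1) * place
--         place *= 26
--     return total - 1
-- ===== Notes on version B (the rewrite author's own statement) =====
-- stated objective: alternative
-- what changed: Replaces A's single Horner loop that accumulates and breaks mid-iteration with a two-step gather-then-reduce: first find the alphabetic prefix length, then compute an explicit reversed positional sum of digit values times powers of 26.
import Mathlib
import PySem

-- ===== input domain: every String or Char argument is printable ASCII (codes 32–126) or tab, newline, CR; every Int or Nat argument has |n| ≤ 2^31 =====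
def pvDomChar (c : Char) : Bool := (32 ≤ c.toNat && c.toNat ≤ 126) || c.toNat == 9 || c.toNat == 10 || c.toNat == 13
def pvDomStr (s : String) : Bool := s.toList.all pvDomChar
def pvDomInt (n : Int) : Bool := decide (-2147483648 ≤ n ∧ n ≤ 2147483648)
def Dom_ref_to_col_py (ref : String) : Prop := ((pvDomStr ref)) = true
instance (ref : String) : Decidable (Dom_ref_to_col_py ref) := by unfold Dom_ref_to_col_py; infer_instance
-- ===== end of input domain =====

-- B replaces A's breaking Horner loop with a gather-then-reversed-positional-sum decomposition (same cost): alternative.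

-- ===== PORT A =====
-- A's for-loop with break: Horner accumulation that stops at the first non-alphabetic char.
def refToColLoopA : List Char → Int → Int
  | [], col => col
  | c :: rest, col =>
    if PySem.Chars.isalpha c then
      refToColLoopA rest (col * 26 + (((PySem.Chars.upperChar c).toNat : Int) - 65 + 1))
    else col

def ref_to_col_py (ref : String) : Int := refToColLoopA ref.toList 0 - 1

-- ===== PORT B =====
-- B's while-loop counting the alphabetic prefix length.
def refToColPrefixLen : List Char → Nat
  | [] => 0
  | c :: rest => if PySem.Chars.isalpha c then refToColPrefixLen rest + 1 else 0

-- B's for-loop over the reversed prefix, carrying (total, place).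
def refToColSumLoop : List Char → Int → Int → Int
  | [], total, _ => total
  | c :: rest, total, place =>
    refToColSumLoop rest (total + (((PySem.Chars.upperChar c).toNat : Int) - 65 + 1) * place) (place * 26)

def ref_to_col_py_alt (ref : String) : Int :=
  refToColSumLoop (ref.toList.take (refToColPrefixLen ref.toList)).reverse 0 1 - 1

-- ===== PRECONDITION & SPEC =====
def Spec_ref_to_col_py (ref : String) (out : Int) : Prop := out = ref_to_col_py_alt ref
instance (ref : String) (out : Int) : Decidable (Spec_ref_to_col_py ref out) := by unfold Spec_ref_to_col_py; infer_instance

-- ===== CLAIM (what is proved, stated in full; the proofs are below) =====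
def Claim_equal_ref_to_col_py : Prop := ∀ (ref : String), Dom_ref_to_col_py ref → Spec_ref_to_col_py ref (ref_to_col_py ref)

-- ===== LEMMAS AND PROOFS =====

def pvVal (c : Char) : Int := ((PySem.Chars.upperChar c).toNat : Int) - 65 + 1

-- little-endian positional value of a digit list (head = least significant)
def pvSumR : List Char → Int
  | [] => 0
  | c :: rest => pvVal c + 26 * pvSumR rest

theorem pvSumR_append_singleton (xs : List Char) (c : Char) :
    pvSumR (xs ++ [c]) = pvSumR xs + pvVal c * 26 ^ xs.length := by
  induction xs with
  | nil => simp [pvSumR]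
  | cons x xs ih =>
    simp only [List.cons_append, pvSumR, ih, List.length_cons, pow_succ]
    ring

theorem sumLoop_eq (l : List Char) (total place : Int) :
    refToColSumLoop l total place = total + place * pvSumR l := by
  induction l generalizing total place with
  | nil => simp [refToColSumLoop, pvSumR]
  | cons c rest ih =>
    simp only [refToColSumLoop, pvSumR, pvVal, ih]
    ring

theorem mem_take_prefixLen (l : List Char) :
    ∀ c ∈ l.take (refToColPrefixLen l), PySem.Chars.isalpha c = true := by
  induction l with
  | nil => simp
  | cons c rest ih =>
    by_cases h : PySem.Chars.isalpha c = true
    · simp [refToColPrefixLen, h]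
      exact ih
    · simp [refToColPrefixLen, h]

theorem loopA_take (l : List Char) (col : Int) :
    refToColLoopA l col = refToColLoopA (l.take (refToColPrefixLen l)) col := by
  induction l generalizing col with
  | nil => rfl
  | cons c rest ih =>
    by_cases h : PySem.Chars.isalpha c = true
    · simp [refToColPrefixLen, h, refToColLoopA]
      exact ih _
    · simp [refToColPrefixLen, h, refToColLoopA]

theorem loopA_alpha (l : List Char) (col : Int)
    (h : ∀ c ∈ l, PySem.Chars.isalpha c = true) :
    refToColLoopA l col = col * 26 ^ l.length + pvSumR l.reverse := by
  induction l generalizing col with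
  | nil => simp [refToColLoopA, pvSumR]
  | cons c rest ih =>
    have hc : PySem.Chars.isalpha c = true := h c (by simp)
    have hrest : ∀ x ∈ rest, PySem.Chars.isalpha x = true := fun x hx => h x (by simp [hx])
    rw [show refToColLoopA (c :: rest) col
        = refToColLoopA rest (col * 26 + pvVal c) by simp [refToColLoopA, hc, pvVal]]
    rw [ih _ hrest, List.reverse_cons, pvSumR_append_singleton]
    simp only [List.length_cons, List.length_reverse, pow_succ]
    ring

-- ===== VERDICT (by name: the statement is the Claim_ definition above) =====
theorem ref_to_col_py_spec : Claim_equal_ref_to_col_py := by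
  intro ref _
  show ref_to_col_py ref = ref_to_col_py_alt ref
  unfold ref_to_col_py ref_to_col_py_alt
  rw [loopA_take, loopA_alpha _ _ (mem_take_prefixLen _), sumLoop_eq]
  ring
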